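-- pv_equiv track=rewrite | github.com/robertoschiavone/labyrinthine | src/labyrinthine/depth_first.py | compute_neighbors
-- ===== SOURCE A (Python) =====
-- from typing import List, Tuple, Union
--
-- def compute_neighbors(matrix: List[List[int]], cell: Tuple[int, int]) -> list[int]:
--     result = []
--     x, y = cell
--     max_width, max_height = len(matrix), len(matrix[0])
--     if x + 2 < max_width:
--         result += [(x + 2, y)]
--     if x - 2 >= 0:
--         result += [(x - 2, y)]
--     if y + 2 < max_height:
--         result += [(x, y + 2)]
--     if y - 2 >= 0:
--         result += [(x, y - 2)]
--
--     result = [cell for cell in result if matrix[cell[0]][cell[1]]]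
--
--     return result
-- ===== SOURCE B (Python) =====
-- def compute_neighbors(matrix, cell):
--     limits = (len(matrix), len(matrix[0]))
--
--     def go(moves):
--         if not moves:
--             return []
--         (axis, step), rest = moves[0], moves[1:]
--         pos = [cell[0], cell[1]]
--         pos[axis] += step
--         v = pos[axis]
--         ok = v < limits[axis] if step > 0 else v >= 0
--         tail = go(rest)
--         if ok and matrix[pos[0]][pos[1]]:
--             return [tuple(pos)] + tail
--         return tail
--
--     return go([(0, 2), (0, -2), (1, 2), (1, -2)])
-- ===== Notes on version B (the rewrite author's own statement) =====
-- stated objective: alternative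
-- what changed: Replaces A's staged passes (four hand-written if-blocks appending candidates to a list, then a separate filter pass over it) with a recursive helper that consumes a generic (axis, step) move list, applies one sign-directed bound rule per move, and conses each valid neighbor directly in a single fused pass.
import Mathlib
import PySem

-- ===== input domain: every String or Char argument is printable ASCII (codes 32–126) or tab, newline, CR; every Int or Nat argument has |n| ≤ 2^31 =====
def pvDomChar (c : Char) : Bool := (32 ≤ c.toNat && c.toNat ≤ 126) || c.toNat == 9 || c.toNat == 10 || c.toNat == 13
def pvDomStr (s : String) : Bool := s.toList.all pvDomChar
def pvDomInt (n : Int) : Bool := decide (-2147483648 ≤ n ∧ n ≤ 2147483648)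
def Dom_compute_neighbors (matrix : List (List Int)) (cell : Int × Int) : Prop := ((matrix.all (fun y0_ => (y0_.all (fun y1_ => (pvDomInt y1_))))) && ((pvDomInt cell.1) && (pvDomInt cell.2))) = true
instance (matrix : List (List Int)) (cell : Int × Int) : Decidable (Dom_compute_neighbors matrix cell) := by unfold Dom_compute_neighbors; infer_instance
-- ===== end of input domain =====

-- B replaces A's staged passes (four hand-written if-blocks appending candidates, then a
-- separate filter pass) with a recursion over (axis, step) moves that conses each valid
-- neighbor directly, with one generic sign-directed bound rule (objective: alternative).

-- shared helper: truthiness of matrix[i][j] (Python int truthiness, negative indices wrap;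
-- out of range = false, which Pre_ keeps unreachable)
def pyTruthyAt (matrix : List (List Int)) (i j : Int) : Bool :=
  match PySem.List.pyGet? matrix i with
  | some row =>
    match PySem.List.pyGet? row j with
    | some v => v != 0
    | none => false
  | none => false

-- ===== PORT A =====
def compute_neighbors (matrix : List (List Int)) (cell : Int × Int) : List (Int × Int) :=
  let x := cell.1
  let y := cell.2
  let max_width : Int := PySem.List.len matrix
  -- matrix[0]: IndexError on empty matrix, excluded by Pre_
  let max_height : Int := PySem.List.len ((PySem.List.pyGet? matrix 0).getD [])
  let result : List (Int × Int) := []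
  let result := if x + 2 < max_width then result ++ [(x + 2, y)] else result
  let result := if x - 2 ≥ 0 then result ++ [(x - 2, y)] else result
  let result := if y + 2 < max_height then result ++ [(x, y + 2)] else result
  let result := if y - 2 ≥ 0 then result ++ [(x, y - 2)] else result
  result.filter (fun c => pyTruthyAt matrix c.1 c.2)

-- ===== PORT B =====
-- recursive 'go' of Source B: consume the moves list, cons valid neighbors front-to-back
def goB (matrix : List (List Int)) (cell : Int × Int) (limits : Int × Int) :
    List (Nat × Int) → List (Int × Int)
  | [] => []
  | (axis, step) :: rest =>
      let nx := if axis = 0 then cell.1 + step else cell.1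
      let ny := if axis = 0 then cell.2 else cell.2 + step
      let v := if axis = 0 then nx else ny
      let limit := if axis = 0 then limits.1 else limits.2
      let ok : Bool := if step > 0 then decide (v < limit) else decide (0 ≤ v)
      let tail := goB matrix cell limits rest
      if ok && pyTruthyAt matrix nx ny then (nx, ny) :: tail else tail

def compute_neighbors_alt (matrix : List (List Int)) (cell : Int × Int) : List (Int × Int) :=
  let limits : Int × Int :=
    (PySem.List.len matrix, PySem.List.len ((PySem.List.pyGet? matrix 0).getD []))
  goB matrix cell limits [(0, 2), (0, -2), (1, 2), (1, -2)]

-- ===== PRECONDITION & SPEC =====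
-- does matrix[a][b] succeed in Python (row index with wraparound, then column in range)?
def rowOkB (matrix : List (List Int)) (a b : Int) : Bool :=
  match PySem.List.pyGet? matrix a with
  | some r => decide (PySem.Raise.InRange r.length b)
  | none => false

-- Pre_ is exactly where A returns normally: a non-empty matrix and, for each candidate A
-- lists, an in-(wrap-)range matrix access; outside it A raises IndexError.
def Pre_compute_neighbors (matrix : List (List Int)) (cell : Int × Int) : Prop :=
  matrix ≠ [] ∧
  (cell.1 + 2 < (matrix.length : Int) → rowOkB matrix (cell.1 + 2) cell.2 = true) ∧
  (0 ≤ cell.1 - 2 → rowOkB matrix (cell.1 - 2) cell.2 = true) ∧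
  (cell.2 + 2 < ((matrix.headD []).length : Int) → rowOkB matrix cell.1 (cell.2 + 2) = true) ∧
  (0 ≤ cell.2 - 2 → rowOkB matrix cell.1 (cell.2 - 2) = true)
instance (matrix : List (List Int)) (cell : Int × Int) : Decidable (Pre_compute_neighbors matrix cell) := by
  unfold Pre_compute_neighbors; infer_instance

def pvWitness_compute_neighbors : List (List Int) × (Int × Int) := ([[1, 0, 1], [0, 0, 0], [1, 0, 1]], (0, 0))

def Spec_compute_neighbors (matrix : List (List Int)) (cell : Int × Int) (out : List (Int × Int)) : Prop := out = compute_neighbors_alt matrix cell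
instance (matrix : List (List Int)) (cell : Int × Int) (out : List (Int × Int)) : Decidable (Spec_compute_neighbors matrix cell out) := by unfold Spec_compute_neighbors; infer_instance

-- ===== CLAIM (what is proved, stated in full; the proofs are below) =====
def Claim_equal_compute_neighbors : Prop := ∀ (matrix : List (List Int)) (cell : Int × Int), Dom_compute_neighbors matrix cell → Pre_compute_neighbors matrix cell → Spec_compute_neighbors matrix cell (compute_neighbors matrix cell)

-- ===== LEMMAS AND PROOFS =====

-- append-step normal form for a conditional 'result += [p]' step
theorem ite_append_step {α : Type} (c : Prop) [Decidable c] (r : List α) (p : α) :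
    (if c then r ++ [p] else r) = r ++ (if c then [p] else []) := by
  split_ifs <;> simp

-- filtering a conditional singleton fuses the test into the condition
theorem filter_ite_singleton {α : Type} (f : α → Bool) (c : Prop) [Decidable c] (p : α) :
    List.filter f (if c then [p] else []) = if c ∧ f p = true then [p] else [] := by
  split_ifs <;> simp_all [List.filter]

-- ===== VERDICT (by name: the statement is the Claim_ definition above) =====
set_option maxHeartbeats 1000000 in
theorem compute_neighbors_spec : Claim_equal_compute_neighbors := by
  intro matrix cell _ _
  unfold Spec_compute_neighbors compute_neighbors compute_neighbors_alt
  simp only [goB]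
  norm_num [sub_eq_add_neg]
  simp only [ite_append_step, List.filter_append, filter_ite_singleton]
  split_ifs <;> simp_all
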